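-- pv_equiv track=rewrite | github.com/vivekgautham/codingchallenges | challenges/src/algos/arrays.py | cycleInArray
-- ===== SOURCE A (Python) =====
-- def cycleInArray(array):
--     p = q = 0
--     while True:
--         if (p < 0 or q < 0 or p >= len(array) or q >= len(array)):
--             return False
--         p = array[p]
--         if p == q: return True
--         if (p < 0 or p >= len(array)):
--             return False
--         p = array[p]
--         if p == q: return True
--         q = array[q]
--         if p == q: return True
--     return False
-- ===== SOURCE B (Python) =====
-- def cycleInArray(array):
--     i = 0
--     seen = set()
--     while 0 <= i < len(array):
--         if i in seen:
--             return True
--         seen.add(i)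
--         i = array[i]
--     return False
-- ===== Notes on version B (the rewrite author's own statement) =====
-- stated objective: simpler
-- what changed: Replaced Floyd's two racing pointers (tortoise/hare with three interleaved equality checks per iteration) by a single pointer plus a visited set: follow i = array[i] from 0, return True on the first revisited index, False when the pointer leaves bounds.
import Mathlib
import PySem

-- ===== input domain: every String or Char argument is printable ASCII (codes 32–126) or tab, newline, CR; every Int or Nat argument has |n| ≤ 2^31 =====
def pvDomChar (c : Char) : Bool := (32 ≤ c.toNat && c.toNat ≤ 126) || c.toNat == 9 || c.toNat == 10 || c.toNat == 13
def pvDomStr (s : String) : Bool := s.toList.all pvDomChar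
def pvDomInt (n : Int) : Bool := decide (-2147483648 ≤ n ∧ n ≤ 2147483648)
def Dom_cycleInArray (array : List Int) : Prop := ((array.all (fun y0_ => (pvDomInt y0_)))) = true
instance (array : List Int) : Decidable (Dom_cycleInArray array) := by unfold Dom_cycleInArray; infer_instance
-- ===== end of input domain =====

-- B replaces Floyd's tortoise-and-hare by a single pointer with a visited set: simpler, one check per step.

-- ===== PORT A =====
-- Python's 'while True' loop is ported with fuel array.length + 1; the proofs below show Floyd's
-- pointers meet (or escape) within that many iterations, so the fuel-exhausted 'false' is unreachable.
-- Indexing array[p] uses array.getD p.toNat 0: exact because every access is guarded by 0 ≤ p < len(array).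
def floydGo (array : List Int) : Nat → Int → Int → Bool
  | 0, _, _ => false
  | fuel+1, p, q =>
    if p < 0 ∨ q < 0 ∨ (array.length : Int) ≤ p ∨ (array.length : Int) ≤ q then false
    else if array.getD p.toNat 0 = q then true
    else if array.getD p.toNat 0 < 0 ∨ (array.length : Int) ≤ array.getD p.toNat 0 then false
    else if array.getD (array.getD p.toNat 0).toNat 0 = q then true
    else if array.getD (array.getD p.toNat 0).toNat 0 = array.getD q.toNat 0 then true
    else floydGo array fuel (array.getD (array.getD p.toNat 0).toNat 0) (array.getD q.toNat 0)

def cycleInArray (array : List Int) : Bool := floydGo array (array.length + 1) 0 0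

-- ===== PORT B =====
-- Source B's while loop, ported with fuel array.length + 1: each iteration adds a fresh index to 'seen'
-- (distinct in-bounds indices), so the loop returns within array.length + 1 iterations.
def visitGo (array : List Int) : Nat → Int → PySem.Set Int → Bool
  | 0, _, _ => false
  | fuel+1, i, seen =>
    if 0 ≤ i ∧ i < (array.length : Int) then
      if i ∈ seen then true
      else visitGo array fuel (array.getD i.toNat 0) (PySem.Set.add seen i)
    else false

def cycleInArray_alt (array : List Int) : Bool :=
  visitGo array (array.length + 1) 0 PySem.Set.empty

-- ===== PRECONDITION & SPEC =====
def Spec_cycleInArray (array : List Int) (out : Bool) : Prop := out = cycleInArray_alt array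
instance (array : List Int) (out : Bool) : Decidable (Spec_cycleInArray array out) := by unfold Spec_cycleInArray; infer_instance

-- ===== CLAIM (what is proved, stated in full; the proofs are below) =====
def Claim_equal_cycleInArray : Prop := ∀ (array : List Int), Dom_cycleInArray array → Spec_cycleInArray array (cycleInArray array)

-- ===== LEMMAS AND PROOFS =====

-- The trajectory of indices followed from 0: x 0 = 0, x (k+1) = array[x k] (junk 0 out of bounds;
-- both programs only ever look at it while it is in bounds).
def xk (array : List Int) : Nat → Int
  | 0 => 0
  | k+1 => array.getD (xk array k).toNat 0

def Inb (array : List Int) (i : Int) : Prop := 0 ≤ i ∧ i < (array.length : Int)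

theorem xk_shift (array : List Int) {a b : Nat} (h : xk array a = xk array b) :
    ∀ t, xk array (a + t) = xk array (b + t) := by
  intro t
  induction t with
  | zero => simpa using h
  | succ t ih =>
    have : xk array (a + t + 1) = xk array (b + t + 1) := by simp [xk, ih]
    simpa [Nat.add_assoc] using this

-- A genuine collision in the trajectory (with everything before it in bounds) means the
-- trajectory cycles forever in bounds.
theorem cyc_of_collision (array : List Int) {a b : Nat} (hab : a < b)
    (h : xk array a = xk array b) (hInb : ∀ j, j < b → Inb array (xk array j)) :
    ∀ k, Inb array (xk array k) := by
  intro k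
  induction k using Nat.strong_induction_on with
  | _ k ih =>
    by_cases hk : k < b
    · exact hInb k hk
    · have heq : xk array k = xk array (a + (k - b)) := by
        have h2 := (xk_shift array h (k - b)).symm
        rw [show b + (k - b) = k from by omega] at h2
        exact h2
      have hlt : a + (k - b) < k := by omega
      rw [heq]; exact ih _ hlt

-- Pigeonhole: length+1 in-bounds trajectory indices must collide.
theorem pigeon (array : List Int)
    (hInb : ∀ j, j ≤ array.length → Inb array (xk array j)) :
    ∃ a b, a < b ∧ b ≤ array.length ∧ xk array a = xk array b := by
  obtain ⟨a, ha, b, hb, hne, heq⟩ :=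
    Finset.exists_ne_map_eq_of_card_lt_of_maps_to
      (s := Finset.range (array.length + 1)) (t := Finset.range array.length)
      (by simp) (f := fun j => (xk array j).toNat)
      (by
        intro j hj
        have hj' := Finset.mem_range.mp hj
        obtain ⟨h0, h1⟩ := hInb j (by omega)
        show (xk array j).toNat ∈ Finset.range array.length
        rw [Finset.mem_range]
        omega)
  have ha' := Finset.mem_range.mp ha
  have hb' := Finset.mem_range.mp hb
  have hxa := hInb a (by omega)
  have hxb := hInb b (by omega)
  have hval : xk array a = xk array b := by
    have h1 := hxa.1; have h2 := hxb.1
    omega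
  rcases Nat.lt_or_ge a b with h | h
  · exact ⟨a, b, h, by omega, hval⟩
  · have hba : b < a := by omega
    exact ⟨b, a, hba, by omega, hval.symm⟩

-- If the trajectory cycles, Floyd's end-of-iteration check x(2m) = x(m) fires for some m ≤ length.
theorem meet (array : List Int) (hcyc : ∀ k, Inb array (xk array k)) :
    ∃ m, 1 ≤ m ∧ m ≤ array.length ∧ xk array (2 * m) = xk array m := by
  obtain ⟨a, b, hab, hbn, heq⟩ := pigeon array (fun j _ => hcyc j)
  set L := b - a with hL
  have hLpos : 0 < L := by omega
  have hper : ∀ t, xk array (a + t + L) = xk array (a + t) := by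
    intro t
    have h1 := xk_shift array heq.symm t
    rw [show a + t + L = b + t from by omega]
    exact h1
  have hmul : ∀ j t, xk array (a + t + j * L) = xk array (a + t) := by
    intro j
    induction j with
    | zero => intro t; simp
    | succ j ih =>
      intro t
      rw [show a + t + (j + 1) * L = a + (t + L) + j * L from by ring, ih (t + L),
        show a + (t + L) = a + t + L from by omega]
      exact hper t
  refine ⟨L * (a / L + 1), Nat.one_le_iff_ne_zero.mpr (by positivity), ?_, ?_⟩
  · have h1 : L * (a / L) ≤ a := by
      rw [Nat.mul_comm]; exact Nat.div_mul_le_self a L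
    have h2 : L * (a / L + 1) = L * (a / L) + L := by ring
    omega
  · set m := L * (a / L + 1) with hm
    have ham : a < m := by
      have hd := Nat.div_add_mod a L
      have hr : a % L < L := Nat.mod_lt _ hLpos
      have h2 : m = L * (a / L) + L := by rw [hm]; ring
      omega
    have hLm : (a / L + 1) * L = m := by rw [hm]; ring
    have h2m : 2 * m = a + (m - a) + (a / L + 1) * L := by rw [hLm]; omega
    rw [h2m, hmul (a / L + 1) (m - a), show a + (m - a) = m from by omega]

-- Floyd returning true implies the trajectory cycles (soundness of port A).
theorem floyd_true (array : List Int) :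
    ∀ fuel c, (∀ j, j < 2 * c → Inb array (xk array j)) →
      floydGo array fuel (xk array (2 * c)) (xk array c) = true →
      ∀ k, Inb array (xk array k) := by
  intro fuel
  induction fuel with
  | zero => intro c _ h; simp [floydGo] at h
  | succ fuel ih =>
    intro c hpre h
    rw [floydGo] at h
    by_cases hg : (xk array (2*c) < 0 ∨ xk array c < 0 ∨
        (array.length : Int) ≤ xk array (2*c) ∨ (array.length : Int) ≤ xk array c)
    · rw [if_pos hg] at h; exact absurd h (by simp)
    · rw [if_neg hg] at h
      simp only [not_or, not_lt, not_le] at hg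
      obtain ⟨hp0, hq0, hpl, hql⟩ := hg
      have e1 : array.getD (xk array (2*c)).toNat 0 = xk array (2*c+1) := rfl
      rw [e1] at h
      have hIc  : Inb array (xk array c) := ⟨hq0, hql⟩
      have hI2c : Inb array (xk array (2*c)) := ⟨hp0, hpl⟩
      have hpre1 : ∀ j, j < 2*c+1 → Inb array (xk array j) := by
        intro j hj
        rcases Nat.lt_or_ge j (2*c) with hlt | hge
        · exact hpre j hlt
        · have : j = 2*c := by omega
          rw [this]; exact hI2c
      by_cases h1 : xk array (2*c+1) = xk array c
      · exact cyc_of_collision array (a := c) (b := 2*c+1) (by omega) h1.symm hpre1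
      · rw [if_neg h1] at h
        by_cases hb : (xk array (2*c+1) < 0 ∨ (array.length : Int) ≤ xk array (2*c+1))
        · rw [if_pos hb] at h; exact absurd h (by simp)
        · rw [if_neg hb] at h
          simp only [not_or, not_lt, not_le] at hb
          have hI2c1 : Inb array (xk array (2*c+1)) := ⟨hb.1, hb.2⟩
          have hpre2 : ∀ j, j < 2*c+2 → Inb array (xk array j) := by
            intro j hj
            rcases Nat.lt_or_ge j (2*c+1) with hlt | hge
            · exact hpre1 j hlt
            · have : j = 2*c+1 := by omega
              rw [this]; exact hI2c1
          have e2 : array.getD (xk array (2*c+1)).toNat 0 = xk array (2*c+2) := rfl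
          have e3 : array.getD (xk array c).toNat 0 = xk array (c+1) := rfl
          rw [e2, e3] at h
          by_cases h2 : xk array (2*c+2) = xk array c
          · exact cyc_of_collision array (a := c) (b := 2*c+2) (by omega) h2.symm hpre2
          · rw [if_neg h2] at h
            by_cases h3 : xk array (2*c+2) = xk array (c+1)
            · exact cyc_of_collision array (a := c+1) (b := 2*c+2) (by omega) h3.symm hpre2
            · rw [if_neg h3] at h
              have e4 : 2*c+2 = 2*(c+1) := by ring
              rw [e4] at h
              exact ih (c+1) (by rw [← e4]; exact hpre2) h

-- If the trajectory cycles, Floyd returns true within the given fuel (completeness of port A).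
theorem floyd_complete (array : List Int) (hcyc : ∀ k, Inb array (xk array k)) :
    ∀ fuel c, (∃ m, c < m ∧ m ≤ c + fuel ∧ xk array (2 * m) = xk array m) →
      floydGo array fuel (xk array (2 * c)) (xk array c) = true := by
  intro fuel
  induction fuel with
  | zero => intro c hm; obtain ⟨m, h1, h2, _⟩ := hm; omega
  | succ fuel ih =>
    intro c hm
    rw [floydGo]
    rw [if_neg (by
      simp only [not_or, not_lt, not_le]
      exact ⟨(hcyc (2*c)).1, (hcyc c).1, (hcyc (2*c)).2, (hcyc c).2⟩)]
    have e1 : array.getD (xk array (2*c)).toNat 0 = xk array (2*c+1) := rfl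
    rw [e1]
    by_cases h1 : xk array (2*c+1) = xk array c
    · rw [if_pos h1]
    · rw [if_neg h1]
      rw [if_neg (by
        simp only [not_or, not_lt, not_le]
        exact ⟨(hcyc (2*c+1)).1, (hcyc (2*c+1)).2⟩)]
      have e2 : array.getD (xk array (2*c+1)).toNat 0 = xk array (2*c+2) := rfl
      have e3 : array.getD (xk array c).toNat 0 = xk array (c+1) := rfl
      rw [e2, e3]
      by_cases h2 : xk array (2*c+2) = xk array c
      · rw [if_pos h2]
      · rw [if_neg h2]
        by_cases h3 : xk array (2*c+2) = xk array (c+1)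
        · rw [if_pos h3]
        · rw [if_neg h3]
          have e4 : 2*c+2 = 2*(c+1) := by ring
          rw [e4]
          obtain ⟨m, hcm, hmf, hmeet⟩ := hm
          have hne : m ≠ c+1 := by
            intro he
            apply h3
            rw [e4, ← he]
            exact hmeet
          exact ih (c+1) ⟨m, by omega, by omega, hmeet⟩

-- B returning true implies the trajectory cycles (soundness of port B).
theorem visit_true (array : List Int) :
    ∀ fuel c (seen : PySem.Set Int),
      (∀ v, v ∈ seen → ∃ j, j < c ∧ xk array j = v) →
      (∀ j, j < c → Inb array (xk array j)) →
      visitGo array fuel (xk array c) seen = true →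
      ∀ k, Inb array (xk array k) := by
  intro fuel
  induction fuel with
  | zero => intro c seen _ _ h; simp [visitGo] at h
  | succ fuel ih =>
    intro c seen hmem hpre h
    rw [visitGo] at h
    by_cases hg : (0 ≤ xk array c ∧ xk array c < (array.length : Int))
    · rw [if_pos hg] at h
      have hIc : Inb array (xk array c) := hg
      have hpre1 : ∀ j, j < c+1 → Inb array (xk array j) := by
        intro j hj
        rcases Nat.lt_or_ge j c with hlt | hge
        · exact hpre j hlt
        · have : j = c := by omega
          rw [this]; exact hIc
      by_cases hin : xk array c ∈ seen
      · obtain ⟨j, hj, hje⟩ := hmem _ hin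
        exact cyc_of_collision array (a := j) (b := c) hj hje hpre
      · rw [if_neg hin] at h
        have e : array.getD (xk array c).toNat 0 = xk array (c+1) := rfl
        rw [e] at h
        refine ih (c+1) (PySem.Set.add seen (xk array c)) ?_ hpre1 h
        intro v hv
        rcases (PySem.Set.mem_add seen (xk array c) v).1 hv with hv | hv
        · obtain ⟨j, hj, hje⟩ := hmem _ hv
          exact ⟨j, by omega, hje⟩
        · exact ⟨c, by omega, hv.symm⟩
    · rw [if_neg hg] at h; exact absurd h (by simp)

-- If the trajectory cycles, B returns true within the given fuel (completeness of port B).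
theorem visit_complete (array : List Int) (hcyc : ∀ k, Inb array (xk array k)) :
    ∀ fuel c (seen : PySem.Set Int),
      (∀ v, v ∈ seen ↔ ∃ j, j < c ∧ xk array j = v) →
      (∀ j1 j2, j1 < j2 → j2 < c → xk array j1 ≠ xk array j2) →
      array.length + 1 ≤ fuel + c →
      visitGo array fuel (xk array c) seen = true := by
  intro fuel
  induction fuel with
  | zero =>
    intro c seen _ hdist hf
    exfalso
    obtain ⟨a, b, hab, hbn, heq⟩ := pigeon array (fun j _ => hcyc j)
    exact hdist a b hab (by omega) heq
  | succ fuel ih =>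
    intro c seen hmem hdist hf
    rw [visitGo]
    rw [if_pos ⟨(hcyc c).1, (hcyc c).2⟩]
    by_cases hin : xk array c ∈ seen
    · rw [if_pos hin]
    · rw [if_neg hin]
      have e : array.getD (xk array c).toNat 0 = xk array (c+1) := rfl
      rw [e]
      refine ih (c+1) (PySem.Set.add seen (xk array c)) ?_ ?_ (by omega)
      · intro v
        rw [PySem.Set.mem_add, hmem v]
        constructor
        · rintro (⟨j, hj, hje⟩ | hv)
          · exact ⟨j, by omega, hje⟩
          · exact ⟨c, by omega, hv.symm⟩
        · rintro ⟨j, hj, hje⟩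
          rcases Nat.lt_or_ge j c with hlt | hge
          · exact Or.inl ⟨j, hlt, hje⟩
          · have : j = c := by omega
            exact Or.inr (by rw [← hje, this])
      · intro j1 j2 h12 h2c
        rcases Nat.lt_or_ge j2 c with hlt | hge
        · exact hdist j1 j2 h12 hlt
        · have hj2 : j2 = c := by omega
          intro heq
          apply hin
          rw [hmem]
          exact ⟨j1, by omega, by rw [heq, hj2]⟩

theorem main_eq (array : List Int) : cycleInArray array = cycleInArray_alt array := by
  unfold cycleInArray cycleInArray_alt
  by_cases hcyc : ∀ k, Inb array (xk array k)
  · obtain ⟨m, hm1, hmn, hmeet⟩ := meet array hcyc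
    have hA : floydGo array (array.length+1) (xk array (2*0)) (xk array 0) = true :=
      floyd_complete array hcyc (array.length+1) 0 ⟨m, by omega, by omega, hmeet⟩
    have hB : visitGo array (array.length+1) (xk array 0) PySem.Set.empty = true :=
      visit_complete array hcyc (array.length+1) 0 PySem.Set.empty
        (by intro v; simp [PySem.Set.empty]) (by intro j1 j2 _ h; omega) (by omega)
    exact hA.trans hB.symm
  · have hA : floydGo array (array.length+1) 0 0 ≠ true := by
      intro h
      exact hcyc (floyd_true array (array.length+1) 0 (by intro j hj; omega) h)
    have hB : visitGo array (array.length+1) 0 PySem.Set.empty ≠ true := by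
      intro h
      refine hcyc (visit_true array (array.length+1) 0 PySem.Set.empty ?_ ?_ h)
      · intro v hv; simp [PySem.Set.empty] at hv
      · intro j hj; omega
    rw [Bool.eq_false_iff.mpr hA, Bool.eq_false_iff.mpr hB]

-- ===== VERDICT (by name: the statement is the Claim_ definition above) =====
theorem cycleInArray_spec : Claim_equal_cycleInArray := by
  intro array _
  simpa [Spec_cycleInArray] using main_eq array
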